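-- pv_equiv track=rewrite | github.com/Derrior/letters | table.py | get_table_columns_width
-- ===== SOURCE A (Python) =====
-- def decrease_width_if_possible(width, terminal_width):
--     current_column = 0
--     while (sum(width) > terminal_width - len(width) - 1):
--         width[current_column] -= 1
--         current_column += 1
--         current_column %= len(width)
--
-- def increase_width_if_possible(width, terminal_width):
--     current_column = 0
--     while (sum(width) < terminal_width - len(width) - 1):
--         width[current_column] += 1
--         current_column += 1
--         current_column %= len(width)
--
-- def get_table_columns_width(width, terminal_columns):
--     koeff = 1
--     while (sum(width) * (koeff + 1) <= terminal_columns - len(width) - 1):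
--         koeff += 1
--     table_columns_width = [width[i] * koeff for i in range(len(width))]
--
--     current_column = 0
--     decrease_width_if_possible(table_columns_width, terminal_columns)
--     increase_width_if_possible(table_columns_width, terminal_columns)
--     return table_columns_width
-- ===== SOURCE B (Python) =====
-- def get_table_columns_width(width, terminal_columns):
--     n = len(width)
--     target = terminal_columns - n - 1
--     s = sum(width)
--     k = max(1, target // s) if s > 0 else 1
--     diff = s * k - target
--     if diff > 0:
--         q, r = divmod(diff, n)
--         return [w * k - q - (1 if i < r else 0) for i, w in enumerate(width)]
--     elif diff < 0:
--         q, r = divmod(-diff, n)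
--         return [w * k + q + (1 if i < r else 0) for i, w in enumerate(width)]
--     else:
--         return [w * k for w in width]
-- ===== Notes on version B (the rewrite author's own statement) =====
-- stated objective: faster
-- what changed: Replaces A's three unit-step loops (increment koeff by 1, then decrement/increment one cell at a time round-robin until the sum fits) by a closed form: koeff = max(1, target//sum) and the remaining difference distributed with one divmod over enumerate(width).
import Mathlib
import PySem

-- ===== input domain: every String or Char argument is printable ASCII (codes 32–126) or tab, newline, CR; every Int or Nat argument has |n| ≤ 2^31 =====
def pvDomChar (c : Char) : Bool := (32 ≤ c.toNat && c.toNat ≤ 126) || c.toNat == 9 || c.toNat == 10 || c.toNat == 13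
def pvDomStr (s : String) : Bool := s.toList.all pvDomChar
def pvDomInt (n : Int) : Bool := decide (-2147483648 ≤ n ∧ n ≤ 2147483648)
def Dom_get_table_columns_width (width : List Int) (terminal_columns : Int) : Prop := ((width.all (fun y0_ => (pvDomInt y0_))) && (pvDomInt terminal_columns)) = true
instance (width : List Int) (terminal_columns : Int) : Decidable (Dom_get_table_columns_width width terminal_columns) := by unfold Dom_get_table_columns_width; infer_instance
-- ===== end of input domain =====

-- B replaces A's three unit-step loops by a closed form (koeff by division, the
-- residual difference distributed by one divmod); equivalence is proved on all
-- inputs where A terminates without an exception (Pre_).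

-- ===== PORT A =====
-- the `while sum(width)*(koeff+1) <= ...: koeff += 1` loop; fuel only makes the
-- recursion total, it exceeds the iteration count on every input admitted by Pre_
def pvKLoop (s target : Int) : Nat → Int → Int
  | 0, k => k
  | fuel+1, k => if s * (k + 1) ≤ target then pvKLoop s target fuel (k + 1) else k

-- decrease_width_if_possible; `target` stands for Python's terminal_width - len(width) - 1;
-- the fuel passed at the call site is the exact number of iterations the Python loop makes
def pvDecLoop (target : Int) : Nat → Nat → List Int → List Int
  | 0, _, w => w
  | fuel+1, c, w =>
      if w.sum > target then pvDecLoop target fuel ((c + 1) % w.length) (w.modify c (· - 1)) else w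

-- increase_width_if_possible
def pvIncLoop (target : Int) : Nat → Nat → List Int → List Int
  | 0, _, w => w
  | fuel+1, c, w =>
      if w.sum < target then pvIncLoop target fuel ((c + 1) % w.length) (w.modify c (· + 1)) else w

def get_table_columns_width (width : List Int) (terminal_columns : Int) : List Int :=
  let target := terminal_columns - (width.length : Int) - 1
  let koeff := pvKLoop width.sum target (terminal_columns.toNat + 2) 1
  let tw := (List.range width.length).map (fun i => width.getD i 0 * koeff)
  let tw2 := pvDecLoop target ((tw.sum - target).toNat) 0 tw
  pvIncLoop target ((target - tw2.sum).toNat) 0 tw2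

-- ===== PORT B =====
def get_table_columns_width_alt (width : List Int) (terminal_columns : Int) : List Int :=
  let n : Int := width.length
  let target := terminal_columns - n - 1
  let s := width.sum
  let k := if s > 0 then max 1 (PySem.Int.floordiv target s) else 1
  let diff := s * k - target
  if diff > 0 then
    let q := PySem.Int.floordiv diff n
    let r := PySem.Int.mod diff n
    width.mapIdx (fun i w => w * k - q - (if (i : Int) < r then 1 else 0))
  else if diff < 0 then
    let q := PySem.Int.floordiv (-diff) n
    let r := PySem.Int.mod (-diff) n
    width.mapIdx (fun i w => w * k + q + (if (i : Int) < r then 1 else 0))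
  else
    width.map (fun w => w * k)

-- ===== PRECONDITION & SPEC =====
-- Pre_ excludes exactly the inputs on which A never returns: the empty list
-- (IndexError or divergence) and nonpositive-sum inputs on which A's koeff loop
-- never terminates; A returns a value on every input satisfying Pre_.
def Pre_get_table_columns_width (width : List Int) (terminal_columns : Int) : Prop :=
  width ≠ [] ∧ (0 < width.sum ∨ terminal_columns - (width.length : Int) - 1 < 2 * width.sum)
instance (width : List Int) (terminal_columns : Int) : Decidable (Pre_get_table_columns_width width terminal_columns) := by unfold Pre_get_table_columns_width; infer_instance

def pvWitness_get_table_columns_width : List Int × Int := ([2, 3], 20)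

def Spec_get_table_columns_width (width : List Int) (terminal_columns : Int) (out : List Int) : Prop := out = get_table_columns_width_alt width terminal_columns
instance (width : List Int) (terminal_columns : Int) (out : List Int) : Decidable (Spec_get_table_columns_width width terminal_columns out) := by unfold Spec_get_table_columns_width; infer_instance

-- ===== CLAIM (what is proved, stated in full; the proofs are below) =====
def Claim_equal_get_table_columns_width : Prop := ∀ (width : List Int) (terminal_columns : Int), Dom_get_table_columns_width width terminal_columns → Pre_get_table_columns_width width terminal_columns → Spec_get_table_columns_width width terminal_columns (get_table_columns_width width terminal_columns)

-- ===== LEMMAS AND PROOFS =====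

-- how many of D round-robin steps starting at column c land on column i (n columns)
def pvCnt (n : Nat) : Nat → Nat → Nat → Nat
  | 0, _, _ => 0
  | D+1, c, i => (if c = i then 1 else 0) + pvCnt n D ((c + 1) % n) i

lemma pvCnt_eq (n : Nat) (hn : 0 < n) :
    ∀ (D c i : Nat), c < n → i < n →
      pvCnt n D c i = D / n + (if (if c ≤ i then i - c else n + i - c) < D % n then 1 else 0) := by
  intro D
  induction D with
  | zero => intro c i hc hi; simp [pvCnt, Nat.zero_mod]
  | succ D ih =>
    intro c i hc hi
    rw [pvCnt]
    have hq := Nat.div_add_mod D n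
    have hm : D % n < n := Nat.mod_lt _ hn
    have hsucc : (D % n + 1 < n ∧ (D+1) / n = D / n ∧ (D+1) % n = D % n + 1)
               ∨ (D % n + 1 = n ∧ (D+1) / n = D / n + 1 ∧ (D+1) % n = 0) := by
      by_cases h : D % n + 1 < n
      · left
        have he : D + 1 = (D % n + 1) + n * (D / n) := by omega
        refine ⟨h, ?_, ?_⟩
        · rw [he, Nat.add_mul_div_left _ _ hn, Nat.div_eq_of_lt h]; omega
        · rw [he, Nat.add_mul_mod_self_left, Nat.mod_eq_of_lt h]
      · right
        have he : D + 1 = n * (D / n + 1) := by rw [Nat.mul_succ]; omega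
        refine ⟨by omega, ?_, ?_⟩
        · rw [he, Nat.mul_div_cancel_left _ hn]
        · rw [he, Nat.mul_mod_right]
    rcases Nat.lt_or_ge (c+1) n with hcn | hcn
    · rw [Nat.mod_eq_of_lt hcn, ih (c+1) i (by omega) hi]
      rcases hsucc with ⟨h1, h2, h3⟩ | ⟨h1, h2, h3⟩ <;> rw [h2, h3] <;> split_ifs <;> omega
    · have h0 : (c+1) % n = 0 := by have : c + 1 = n := by omega
                                    rw [this, Nat.mod_self]
      rw [h0, ih 0 i hn hi]
      rcases hsucc with ⟨h1, h2, h3⟩ | ⟨h1, h2, h3⟩ <;> rw [h2, h3] <;> split_ifs <;> omega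

lemma pv_sum_modify_sub (l : List Int) (i : Nat) (h : i < l.length) :
    (l.modify i (· - 1)).sum = l.sum - 1 := by
  induction l generalizing i with
  | nil => simp at h
  | cons a t ih =>
    cases i with
    | zero => simp [List.modify_zero_cons]; ring
    | succ j => rw [List.modify_succ_cons]; simp [ih j (by simpa using h)]; ring

lemma pv_sum_modify_add (l : List Int) (i : Nat) (h : i < l.length) :
    (l.modify i (· + 1)).sum = l.sum + 1 := by
  induction l generalizing i with
  | nil => simp at h
  | cons a t ih =>
    cases i with
    | zero => simp [List.modify_zero_cons]; ring
    | succ j => rw [List.modify_succ_cons]; simp [ih j (by simpa using h)]; ring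

lemma pv_mapIdx_sub_zero (w : List Int) (f : Nat → Int) (h : ∀ i, i < w.length → f i = 0) :
    w.mapIdx (fun i x => x - f i) = w := by
  apply List.ext_getElem
  · simp
  · intro i h1 h2
    rw [List.getElem_mapIdx, h i h2]
    ring

lemma pv_mapIdx_add_zero (w : List Int) (f : Nat → Int) (h : ∀ i, i < w.length → f i = 0) :
    w.mapIdx (fun i x => x + f i) = w := by
  apply List.ext_getElem
  · simp
  · intro i h1 h2
    rw [List.getElem_mapIdx, h i h2]
    ring

lemma pvDecLoop_eq (t : Int) :
    ∀ (D fuel c : Nat) (w : List Int), c < w.length → w.sum = t + D → D ≤ fuel →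
      pvDecLoop t fuel c w = w.mapIdx (fun i x => x - (pvCnt w.length D c i : Int)) := by
  intro D
  induction D with
  | zero =>
    intro fuel c w hc hsum hf
    have hcond : ¬ (w.sum > t) := by omega
    have hw : pvDecLoop t fuel c w = w := by
      cases fuel with
      | zero => rfl
      | succ f => rw [pvDecLoop, if_neg hcond]
    rw [hw]
    exact (pv_mapIdx_sub_zero w _ (fun i _ => by simp [pvCnt])).symm
  | succ D ih =>
    intro fuel c w hc hsum hf
    cases fuel with
    | zero => omega
    | succ f =>
      have hcond : w.sum > t := by omega
      rw [pvDecLoop, if_pos hcond]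
      have hn : 0 < w.length := by omega
      have hlen : (w.modify c (· - 1)).length = w.length := by simp
      rw [ih f ((c+1) % w.length) (w.modify c (· - 1))
            (by rw [hlen]; exact Nat.mod_lt _ hn)
            (by rw [pv_sum_modify_sub w c hc]; omega)
            (by omega)]
      apply List.ext_getElem
      · simp
      · intro i h1 h2
        have hiw : i < w.length := by simpa using h2
        rw [List.getElem_mapIdx, List.getElem_mapIdx, List.getElem_modify]
        simp only [hlen, pvCnt]
        push_cast
        split_ifs <;> omega

lemma pvDecLoop_sum (t : Int) :
    ∀ (D fuel c : Nat) (w : List Int), c < w.length → w.sum = t + D → D ≤ fuel →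
      (pvDecLoop t fuel c w).sum = t := by
  intro D
  induction D with
  | zero =>
    intro fuel c w hc hsum hf
    have hcond : ¬ (w.sum > t) := by omega
    cases fuel with
    | zero => simpa [pvDecLoop] using hsum
    | succ f => rw [pvDecLoop, if_neg hcond]; omega
  | succ D ih =>
    intro fuel c w hc hsum hf
    cases fuel with
    | zero => omega
    | succ f =>
      have hcond : w.sum > t := by omega
      have hn : 0 < w.length := by omega
      rw [pvDecLoop, if_pos hcond]
      exact ih f _ _ (by simp; exact Nat.mod_lt _ hn)
        (by rw [pv_sum_modify_sub w c hc]; omega) (by omega)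

lemma pvIncLoop_eq (t : Int) :
    ∀ (D fuel c : Nat) (w : List Int), c < w.length → w.sum = t - D → D ≤ fuel →
      pvIncLoop t fuel c w = w.mapIdx (fun i x => x + (pvCnt w.length D c i : Int)) := by
  intro D
  induction D with
  | zero =>
    intro fuel c w hc hsum hf
    have hcond : ¬ (w.sum < t) := by omega
    have hw : pvIncLoop t fuel c w = w := by
      cases fuel with
      | zero => rfl
      | succ f => rw [pvIncLoop, if_neg hcond]
    rw [hw]
    exact (pv_mapIdx_add_zero w _ (fun i _ => by simp [pvCnt])).symm
  | succ D ih =>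
    intro fuel c w hc hsum hf
    cases fuel with
    | zero => omega
    | succ f =>
      have hcond : w.sum < t := by omega
      rw [pvIncLoop, if_pos hcond]
      have hn : 0 < w.length := by omega
      have hlen : (w.modify c (· + 1)).length = w.length := by simp
      rw [ih f ((c+1) % w.length) (w.modify c (· + 1))
            (by rw [hlen]; exact Nat.mod_lt _ hn)
            (by rw [pv_sum_modify_add w c hc]; omega)
            (by omega)]
      apply List.ext_getElem
      · simp
      · intro i h1 h2
        have hiw : i < w.length := by simpa using h2
        rw [List.getElem_mapIdx, List.getElem_mapIdx, List.getElem_modify]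
        simp only [hlen, pvCnt]
        push_cast
        split_ifs <;> omega

lemma pvKLoop_eq (s t : Int) (hs : 0 < s) :
    ∀ (fuel : Nat) (k : Int), (t / s - k).toNat ≤ fuel → pvKLoop s t fuel k = max k (t / s) := by
  intro fuel
  induction fuel with
  | zero => intro k hf; simp [pvKLoop]; omega
  | succ f ih =>
    intro k hf
    by_cases h : s * (k + 1) ≤ t
    · have hk : k + 1 ≤ t / s := (Int.le_ediv_iff_mul_le hs).2 (by linarith [mul_comm s (k+1)])
      rw [pvKLoop, if_pos h, ih (k+1) (by omega)]
      omega
    · have hk : t / s ≤ k := by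
        by_contra hc
        exact h (by have := (Int.le_ediv_iff_mul_le hs).1 (by omega : k + 1 ≤ t / s); linarith [mul_comm (k+1) s])
      rw [pvKLoop, if_neg h]
      omega

lemma pv_range_map (w : List Int) (k : Int) :
    (List.range w.length).map (fun i => w.getD i 0 * k) = w.map (· * k) := by
  apply List.ext_getElem
  · simp
  · intro i h1 h2
    simp
    left
    simp [List.getElem?_eq_getElem (by simpa using h2)]

lemma pv_sum_map_mul (w : List Int) (k : Int) : (w.map (· * k)).sum = w.sum * k := by
  induction w with
  | nil => simp
  | cons a t ih => simp [ih]; ring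

-- ===== VERDICT (by name: the statement is the Claim_ definition above) =====
theorem get_table_columns_width_spec : Claim_equal_get_table_columns_width := by
  intro width T _hdom hpre
  obtain ⟨hne, hpre2⟩ := hpre
  have hn : 0 < width.length := List.length_pos_iff.mpr hne
  have hn' : (1 : Int) ≤ (width.length : Int) := by exact_mod_cast hn
  unfold Spec_get_table_columns_width
  simp only [get_table_columns_width, get_table_columns_width_alt]
  set s : Int := width.sum with hs
  set target : Int := T - (width.length : Int) - 1 with htarget
  -- the koeff loop computes B's closed-form koeff
  have hk : pvKLoop s target (T.toNat + 2) 1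
      = (if s > 0 then max 1 (PySem.Int.floordiv target s) else 1) := by
    by_cases hspos : 0 < s
    · have hfuel : (target / s - 1).toNat ≤ T.toNat + 2 := by
        by_cases h2 : 2 ≤ target / s
        · have hd := Int.mul_ediv_add_emod target s
          have hr : 0 ≤ target % s := Int.emod_nonneg target (ne_of_gt hspos)
          have hQle : target / s ≤ target := by nlinarith
          omega
        · omega
      rw [pvKLoop_eq s target hspos _ 1 hfuel, if_pos hspos,
          PySem.Int.floordiv_eq_ediv_of_pos hspos]
    · have h2s : target < 2 * s := by
        rcases hpre2 with h | h
        · omega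
        · exact h
      rw [if_neg hspos]
      show pvKLoop s target (T.toNat + 1 + 1) 1 = 1
      have hcond : ¬ s * (1 + 1) ≤ target := by nlinarith
      rw [pvKLoop, if_neg hcond]
  rw [hk]
  set k : Int := (if s > 0 then max 1 (PySem.Int.floordiv target s) else 1) with hkdef
  rw [pv_range_map]
  have htws : (width.map (· * k)).sum = s * k := by rw [pv_sum_map_mul]
  have hlen : (width.map (· * k)).length = width.length := List.length_map ..
  rcases lt_trichotomy (s * k - target) 0 with hd | hd | hd
  · -- sum too small: decrease loop is a no-op, increase loop distributes the deficit
    have hdz : ((width.map (· * k)).sum - target).toNat = 0 := by rw [htws]; omega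
    rw [hdz]
    show pvIncLoop target ((target - (width.map (· * k)).sum).toNat) 0 (width.map (· * k)) = _
    set D : Nat := (target - s * k).toNat with hD
    have hDfuel : (target - (width.map (· * k)).sum).toNat = D := by rw [htws]
    rw [hDfuel, pvIncLoop_eq target D D 0 (width.map (· * k)) (by omega)
        (by rw [htws]; omega) le_rfl]
    rw [if_neg (by omega), if_pos (by omega)]
    have hnegdiff : -(s * k - target) = (D : Int) := by omega
    rw [hnegdiff, PySem.Int.floordiv_natCast, PySem.Int.mod_natCast]
    apply List.ext_getElem
    · simp
    · intro i h1 h2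
      have hiw : i < width.length := by simpa using h2
      rw [List.getElem_mapIdx, List.getElem_mapIdx]
      simp only [hlen, List.getElem_map]
      rw [pvCnt_eq width.length hn D 0 i hn hiw]
      simp only [Nat.zero_le, if_pos, Nat.sub_zero]
      push_cast
      split_ifs <;> omega
  · -- sums already equal: both loops are no-ops
    have hdz : ((width.map (· * k)).sum - target).toNat = 0 := by rw [htws]; omega
    rw [hdz]
    show pvIncLoop target ((target - (width.map (· * k)).sum).toNat) 0 (width.map (· * k)) = _
    have hiz : (target - (width.map (· * k)).sum).toNat = 0 := by rw [htws]; omega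
    rw [hiz]
    rw [if_neg (by omega), if_neg (by omega)]
    rfl
  · -- sum too large: decrease loop distributes the excess, increase loop is a no-op
    set D : Nat := (s * k - target).toNat with hD
    have hDfuel : ((width.map (· * k)).sum - target).toNat = D := by rw [htws]
    rw [hDfuel]
    have hsum' : (width.map (· * k)).sum = target + D := by rw [htws]; omega
    have hdecsum : (pvDecLoop target D 0 (width.map (· * k))).sum = target :=
      pvDecLoop_sum target D D 0 _ (by omega) hsum' le_rfl
    rw [hdecsum, pvDecLoop_eq target D D 0 (width.map (· * k)) (by omega) hsum' le_rfl]
    have hiz : (target - target).toNat = 0 := by omega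
    rw [hiz]
    show (List.mapIdx _ (width.map (· * k))) = _
    rw [if_pos (by omega)]
    have hposdiff : s * k - target = (D : Int) := by omega
    rw [hposdiff, PySem.Int.floordiv_natCast, PySem.Int.mod_natCast]
    apply List.ext_getElem
    · simp
    · intro i h1 h2
      have hiw : i < width.length := by simpa using h2
      rw [List.getElem_mapIdx, List.getElem_mapIdx]
      simp only [hlen, List.getElem_map]
      rw [pvCnt_eq width.length hn D 0 i hn hiw]
      simp only [Nat.zero_le, if_pos, Nat.sub_zero]
      push_cast
      split_ifs <;> omega
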